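-- pv_equiv track=rewrite | github.com/vpittamp/nixos-config | home-modules/tools/i3_project_manager/services/form_validator.py | _is_valid_git_ref
-- ===== SOURCE A (Python) =====
-- def _is_valid_git_ref(ref: str) -> bool:
--     """
--     Validate Git reference name format
--
--     Per git-check-ref-format rules:
--     - Cannot start/end with slash or dot
--     - Cannot contain consecutive dots (..)
--     - Cannot contain spaces or control characters
--     - Cannot contain shell metacharacters
--     """
--     if not ref:
--         return False
--
--     # Basic checks
--     if ref.startswith(("/", ".")) or ref.endswith(("/", ".")):
--         return False
--
--     if ".." in ref:
--         return False
--
--     # Check for invalid characters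
--     invalid_chars = [" ", "~", "^", ":", "?", "*", "[", "\\", "\n", "\r", "\t"]
--     for char in invalid_chars:
--         if char in ref:
--             return False
--
--     return True
-- ===== SOURCE B (Python) =====
-- def _is_valid_git_ref(ref: str) -> bool:
--     if not ref:
--         return False
--     if ref[0] in "/." or ref[-1] in "/.":
--         return False
--     bad = frozenset(" ~^:?*[\\\n\r\t")
--     prev_dot = False
--     for ch in ref:
--         if ch in bad:
--             return False
--         if ch == "." and prev_dot:
--             return False
--         prev_dot = ch == "."
--     return True
-- ===== Notes on version B (the rewrite author's own statement) =====
-- stated objective: alternative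
-- what changed: Replaces the consecutive-dot substring search plus ten separate full-string membership scans with a single left-to-right pass that tracks whether the previous character was a dot and tests each character against one set of invalid characters.
import Mathlib
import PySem

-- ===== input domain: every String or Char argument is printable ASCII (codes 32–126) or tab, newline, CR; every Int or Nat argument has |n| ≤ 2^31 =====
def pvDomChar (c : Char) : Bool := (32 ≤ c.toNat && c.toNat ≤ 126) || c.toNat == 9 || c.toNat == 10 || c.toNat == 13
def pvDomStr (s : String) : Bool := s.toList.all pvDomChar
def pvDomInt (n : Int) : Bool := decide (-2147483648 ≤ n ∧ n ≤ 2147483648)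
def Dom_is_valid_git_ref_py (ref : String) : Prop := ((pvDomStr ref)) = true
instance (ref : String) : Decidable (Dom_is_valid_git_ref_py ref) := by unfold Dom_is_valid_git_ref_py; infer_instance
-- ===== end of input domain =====

-- B replaces A's '..' substring search and ten separate whole-string scans by one
-- left-to-right pass that tracks whether the previous character was a dot (alternative; not timed faster).

-- ===== PORT A =====
-- the invalid_chars list of A
def pvInvalidChars : List Char := [' ', '~', '^', ':', '?', '*', '[', '\\', '\n', '\r', '\t']

def is_valid_git_ref_py (ref : String) : Bool :=
  if ref.toList.isEmpty then false            -- 'if not ref'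
  else if PySem.Str.startswith ref "/" || PySem.Str.startswith ref "." ||
          PySem.Str.endswith ref "/" || PySem.Str.endswith ref "." then false
  else if PySem.Str.isIn ".." ref then false
  -- 'for char in invalid_chars: if char in ref: return False'
  else if pvInvalidChars.any (fun ch => PySem.Str.isIn (String.ofList [ch]) ref) then false
  else true

-- ===== PORT B =====
-- one frozenset membership test of B
def pvBad (c : Char) : Bool :=
  c == ' ' || c == '~' || c == '^' || c == ':' || c == '?' || c == '*' ||
  c == '[' || c == '\\' || c == '\n' || c == '\r' || c == '\t'

-- B's single pass: state = 'previous char was a dot'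
def pvScan : List Char → Bool → Bool
  | [], _ => true
  | c :: rest, prevDot =>
      if pvBad c then false
      else if c == '.' && prevDot then false
      else pvScan rest (c == '.')

def is_valid_git_ref_py_alt (ref : String) : Bool :=
  match ref.toList with
  | [] => false                               -- 'if not ref'
  | c :: rest =>
      if c == '/' || c == '.' then false      -- ref[0] in "/."
      else if (c :: rest).getLast (by simp) == '/' ||
              (c :: rest).getLast (by simp) == '.' then false   -- ref[-1] in "/."
      else pvScan (c :: rest) false

-- ===== PRECONDITION & SPEC =====
def Spec_is_valid_git_ref_py (ref : String) (out : Bool) : Prop := out = is_valid_git_ref_py_alt ref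
instance (ref : String) (out : Bool) : Decidable (Spec_is_valid_git_ref_py ref out) := by unfold Spec_is_valid_git_ref_py; infer_instance

-- ===== CLAIM (what is proved, stated in full; the proofs are below) =====
def Claim_equal_is_valid_git_ref_py : Prop := ∀ (ref : String), Dom_is_valid_git_ref_py ref → Spec_is_valid_git_ref_py ref (is_valid_git_ref_py ref)

-- ===== LEMMAS AND PROOFS =====

-- double-dot detector equivalent to pvScan's second test, isolated for the proof
def pvDD : List Char → Bool → Bool
  | [], _ => false
  | c :: rest, prevDot => (c == '.' && prevDot) || pvDD rest (c == '.')

theorem pvScan_eq (cs : List Char) (p : Bool) :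
    pvScan cs p = (cs.all (fun c => !pvBad c) && !pvDD cs p) := by
  induction cs generalizing p with
  | nil => rfl
  | cons c rest ih =>
      simp only [pvScan, pvDD, List.all_cons]
      by_cases hb : pvBad c = true
      · simp [hb]
      · simp only [Bool.not_eq_true] at hb
        by_cases hd : (c == '.' && p) = true
        · simp [hb, hd]
        · simp only [Bool.not_eq_true] at hd
          simp [hb, hd, ih]

theorem singleton_infix_iff {α : Type} (a : α) (l : List α) :
    [a] <:+: l ↔ a ∈ l := by
  constructor
  · intro h; exact h.mem (List.mem_singleton_self a)
  · intro h
    obtain ⟨s, t, rfl⟩ := List.append_of_mem h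
    exact ⟨s, t, by simp⟩

theorem singleton_prefix_iff {α : Type} (a : α) (l : List α) :
    [a] <+: l ↔ l.head? = some a := by
  cases l with
  | nil => simp
  | cons b t => simp [List.cons_prefix_cons, eq_comm]

theorem pvDD_iff (cs : List Char) (p : Bool) :
    pvDD cs p = true ↔ (p = true ∧ cs.head? = some '.') ∨ ['.', '.'] <:+: cs := by
  induction cs generalizing p with
  | nil => simp [pvDD]
  | cons c rest ih =>
      simp only [pvDD, Bool.or_eq_true, Bool.and_eq_true, beq_iff_eq, ih, List.head?_cons]
      rw [List.infix_cons_iff]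
      have hpre : ['.', '.'] <+: c :: rest ↔ c = '.' ∧ rest.head? = some '.' := by
        rw [List.cons_prefix_cons, singleton_prefix_iff]
        tauto
      rw [hpre]
      constructor
      · rintro (⟨hc, hp⟩ | ⟨hc, hh⟩ | h)
        · exact Or.inl ⟨hp, by simp [hc]⟩
        · exact Or.inr (Or.inl ⟨hc, hh⟩)
        · exact Or.inr (Or.inr h)
      · rintro (⟨hp, hh⟩ | ⟨hc, hh⟩ | h)
        · simp at hh; exact Or.inl ⟨hh, hp⟩
        · exact Or.inr (Or.inl ⟨hc, hh⟩)
        · exact Or.inr (Or.inr h)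

theorem pvBad_iff (c : Char) : pvBad c = true ↔ c ∈ pvInvalidChars := by
  simp [pvBad, pvInvalidChars]; tauto

theorem singleton_endswith_iff {α : Type} (a : α) (l : List α) :
    [a] <:+ l ↔ l.getLast? = some a := by
  constructor
  · rintro ⟨s, rfl⟩; simp
  · intro h
    obtain ⟨t, rfl⟩ := (List.getLast?_eq_some_iff).1 h
    exact ⟨t, rfl⟩

-- ===== VERDICT (by name: the statement is the Claim_ definition above) =====
theorem is_valid_git_ref_py_spec : Claim_equal_is_valid_git_ref_py := by
  intro ref _
  unfold Spec_is_valid_git_ref_py is_valid_git_ref_py is_valid_git_ref_py_alt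
  cases h : ref.toList with
  | nil => simp
  | cons c rest =>
      rw [Bool.eq_iff_iff]
      simp only [h, List.isEmpty_cons, PySem.Str.startswith_eq, PySem.Str.endswith_eq,
        PySem.Str.isIn_eq, String.toList_ofList]
      simp only [show ("/" : String).toList = ['/'] from rfl,
        show ("." : String).toList = ['.'] from rfl,
        show (".." : String).toList = ['.', '.'] from rfl]
      simp only [PySem.Chars.startswith_iff, PySem.Chars.endswith_iff, PySem.Chars.isIn_iff_infix,
        singleton_prefix_iff, singleton_endswith_iff, singleton_infix_iff,
        pvScan_eq, List.any_eq_true, List.all_eq_true,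
        List.head?_cons, Bool.ite_eq_true_distrib, Bool.and_eq_true, Bool.not_eq_true', Bool.or_eq_true,
        beq_iff_eq, Option.some_inj]
      have hdd : pvDD (c :: rest) false = false ↔ ¬ (['.', '.'] <:+: c :: rest) := by
        rw [← Bool.not_eq_true, not_iff_not, pvDD_iff]; simp
      have hbad : (∀ x ∈ c :: rest, pvBad x = false) ↔
          ¬ ∃ x ∈ pvInvalidChars, x ∈ c :: rest := by
        constructor
        · rintro hall ⟨x, hx, hmem⟩
          exact absurd ((pvBad_iff x).2 hx) (by simp [hall x hmem])
        · intro hno x hx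
          by_contra hb
          simp only [Bool.not_eq_false] at hb
          exact hno ⟨x, (pvBad_iff x).1 hb, hx⟩
      rw [List.getLast?_eq_some_getLast (by simp : c :: rest ≠ [])]
      simp only [Option.some_inj, Bool.false_eq_true, if_false_left]
      rw [hdd, hbad]
      tauto
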